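-- pv_equiv track=rewrite | github.com/steveelliott7717/personal-agent-ste | backend/agents/repo_updater_agent.py | _parse_files_artifact
-- ===== SOURCE A (Python) =====
-- def _parse_files_artifact(s: str) -> dict[str, str]:
--     """
--     Parse a FILES artifact:
--
--       BEGIN_FILE path/to/file
--       <entire new file content>
--       END_FILE
--
--     Returns: { "path/to/file": "<content>", ... }
--     """
--     files: dict[str, str] = {}
--     cur: str | None = None
--     buf: list[str] = []
--     for line in (s or "").splitlines(keepends=True):
--         if line.startswith("BEGIN_FILE "):
--             if cur is not None:
--                 files[cur] = "".join(buf)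
--                 buf.clear()
--             cur = line[len("BEGIN_FILE ") :].strip()
--             continue
--         if line.startswith("END_FILE"):
--             if cur is not None:
--                 files[cur] = "".join(buf)
--                 cur = None
--                 buf.clear()
--             continue
--         if cur is not None:
--             buf.append(line)
--     if cur is not None:
--         files[cur] = "".join(buf)
--     return files
-- ===== SOURCE B (Python) =====
-- def _parse_files_artifact(s: str) -> dict[str, str]:
--     """Block-slicing reimplementation: instead of a stateful open-file/buffer
--     machine, recurse over marker blocks - each BEGIN line grabs the run of
--     non-marker lines that follows it as one slice."""
--
--     def _is_marker(line: str) -> bool: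
--         return line.startswith("BEGIN_FILE ") or line.startswith("END_FILE")
--
--     files: dict[str, str] = {}
--     rest = (s or "").splitlines(keepends=True)
--     while rest:
--         line, rest = rest[0], rest[1:]
--         if line.startswith("BEGIN_FILE "):
--             j = 0
--             while j < len(rest) and not _is_marker(rest[j]):
--                 j += 1
--             files[line[len("BEGIN_FILE "):].strip()] = "".join(rest[:j])
--             rest = rest[j:]
--     return files
-- ===== Notes on version B (the rewrite author's own statement) =====
-- stated objective: alternative
-- what changed: Replaces A's single stateful pass with an open-file/buffer state machine by a marker-block recursion: each BEGIN line slices off the following run of non-marker lines as the file content, so no cur/buf state is maintained.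
import Mathlib
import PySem

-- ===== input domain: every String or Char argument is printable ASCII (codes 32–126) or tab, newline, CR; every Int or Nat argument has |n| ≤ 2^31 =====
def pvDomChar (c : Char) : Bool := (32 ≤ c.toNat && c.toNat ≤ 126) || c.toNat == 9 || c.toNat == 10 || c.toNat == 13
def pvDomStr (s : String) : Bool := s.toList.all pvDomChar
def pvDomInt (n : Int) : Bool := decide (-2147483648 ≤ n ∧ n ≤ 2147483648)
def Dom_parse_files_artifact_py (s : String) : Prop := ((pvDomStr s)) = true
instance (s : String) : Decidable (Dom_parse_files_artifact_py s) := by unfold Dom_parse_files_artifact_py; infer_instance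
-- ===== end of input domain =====

-- B replaces A's stateful open-file/buffer pass by a marker-block recursion (each
-- BEGIN slices off the run of non-marker lines that follows); same cost, alternative decomposition.

-- shared by both ports (the two Pythons share these literals and splitlines(keepends=True))
def pvBegin : List Char := "BEGIN_FILE ".toList
def pvEnd : List Char := "END_FILE".toList

-- splitlines(keepends=True), by hand (PySem.Chars.splitlines drops the ends);
-- exact on Dom_: the only line-break characters admitted there are '\n' and '\r' (incl. "\r\n")
def pvSplitKeep : List Char → List (List Char)
  | [] => []
  | '\r' :: '\n' :: rest => ['\r', '\n'] :: pvSplitKeep rest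
  | c :: rest =>
    if c = '\n' then ['\n'] :: pvSplitKeep rest
    else if c = '\r' then ['\r'] :: pvSplitKeep rest
    else
      match pvSplitKeep rest with
      | [] => [[c]]
      | l :: ls => (c :: l) :: ls

-- ===== PORT A =====
-- A's for-loop as the obvious structural recursion over the same state (files, cur, buf);
-- the [] case is the trailing `if cur is not None` flush.
def parseLoopA : List (List Char) → PySem.Dict (List Char) (List Char) →
    Option (List Char) → List (List Char) → PySem.Dict (List Char) (List Char)
  | [], files, cur, buf =>
    match cur with
    | some p => files.insert p (PySem.Chars.join [] buf)
    | none => files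
  | line :: rest, files, cur, buf =>
    if PySem.Chars.startswith line pvBegin then
      match cur with
      | some p =>
        parseLoopA rest (files.insert p (PySem.Chars.join [] buf))
          (some (PySem.Chars.strip (PySem.List.slice line (some 11) none))) []
      | none =>
        parseLoopA rest files
          (some (PySem.Chars.strip (PySem.List.slice line (some 11) none))) buf
    else if PySem.Chars.startswith line pvEnd then
      match cur with
      | some p => parseLoopA rest (files.insert p (PySem.Chars.join [] buf)) none []
      | none => parseLoopA rest files cur buf
    else
      if cur.isSome then parseLoopA rest files cur (buf ++ [line])
      else parseLoopA rest files cur buf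

def parse_files_artifact_py (s : String) : List (String × String) :=
  (parseLoopA (pvSplitKeep s.toList) PySem.Dict.empty none []).items.map
    (fun kv => (String.ofList kv.1, String.ofList kv.2))

-- ===== PORT B =====
def pvIsMarker (line : List Char) : Bool :=
  PySem.Chars.startswith line pvBegin || PySem.Chars.startswith line pvEnd

-- Source B's while loop: pop the head; a BEGIN head slices off the following run of
-- non-marker lines (the inner `j` scan = takeWhile/dropWhile) as the content.
def parseLoopB : List (List Char) → PySem.Dict (List Char) (List Char) →
    PySem.Dict (List Char) (List Char)
  | [], files => files
  | line :: rest, files =>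
    if PySem.Chars.startswith line pvBegin then
      parseLoopB (rest.dropWhile (fun l => !pvIsMarker l))
        (files.insert (PySem.Chars.strip (PySem.List.slice line (some 11) none))
          (PySem.Chars.join [] (rest.takeWhile (fun l => !pvIsMarker l))))
    else parseLoopB rest files
  termination_by ls _ => ls.length
  decreasing_by
    · exact Nat.lt_succ_of_le (List.length_dropWhile_le _ _)
    · simp

def parse_files_artifact_py_alt (s : String) : List (String × String) :=
  (parseLoopB (pvSplitKeep s.toList) PySem.Dict.empty).items.map
    (fun kv => (String.ofList kv.1, String.ofList kv.2))

-- ===== PRECONDITION & SPEC =====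
def Spec_parse_files_artifact_py (s : String) (out : List (String × String)) : Prop := out = parse_files_artifact_py_alt s
instance (s : String) (out : List (String × String)) : Decidable (Spec_parse_files_artifact_py s out) := by unfold Spec_parse_files_artifact_py; infer_instance

-- ===== CLAIM (what is proved, stated in full; the proofs are below) =====
def Claim_equal_parse_files_artifact_py : Prop := ∀ (s : String), Dom_parse_files_artifact_py s → Spec_parse_files_artifact_py s (parse_files_artifact_py s)

-- ===== LEMMAS AND PROOFS =====

theorem loopAB (ls : List (List Char)) :
    ∀ (files : PySem.Dict (List Char) (List Char)) (cur : Option (List Char))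
      (buf : List (List Char)), (cur = none → buf = []) →
    parseLoopA ls files cur buf =
      match cur with
      | none => parseLoopB ls files
      | some p =>
          parseLoopB (ls.dropWhile (fun l => !pvIsMarker l))
            (files.insert p
              (PySem.Chars.join [] (buf ++ ls.takeWhile (fun l => !pvIsMarker l)))) := by
  induction ls with
  | nil =>
    intro files cur buf hinv
    cases cur <;> simp [parseLoopA, parseLoopB]
  | cons line rest ih =>
    intro files cur buf hinv
    by_cases hb : PySem.Chars.startswith line pvBegin = true
    · have hm : pvIsMarker line = true := by simp [pvIsMarker, hb]
      cases cur with
      | none =>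
        have hbuf : buf = [] := hinv rfl
        subst hbuf
        simp only [parseLoopA, hb, if_true]
        rw [ih _ (some _) [] (by simp)]
        simp [parseLoopB, hb]
      | some p =>
        simp only [parseLoopA, hb, if_true]
        rw [ih _ (some _) [] (by simp)]
        simp [List.dropWhile, List.takeWhile, hm, parseLoopB, hb]
    · by_cases he : PySem.Chars.startswith line pvEnd = true
      · have hm : pvIsMarker line = true := by simp [pvIsMarker, he]
        cases cur with
        | none =>
          simp only [parseLoopA, hb, he, if_true]
          rw [ih _ none buf hinv]
          simp [parseLoopB, hb]
        | some p =>
          simp only [parseLoopA, hb, he, if_true]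
          rw [ih _ none [] (fun _ => rfl)]
          simp [List.dropWhile, List.takeWhile, hm, parseLoopB, hb]
      · have hm : pvIsMarker line = false := by simp [pvIsMarker, hb, he]
        cases cur with
        | none =>
          simp only [parseLoopA, hb, he, Option.isSome_none, Bool.false_eq_true, if_false]
          rw [ih _ none buf hinv]
          simp [parseLoopB, hb]
        | some p =>
          simp only [parseLoopA, hb, he, Option.isSome_some, if_true]
          rw [ih _ (some _) (buf ++ [line]) (by simp)]
          simp [List.dropWhile, List.takeWhile, hm]

-- ===== VERDICT (by name: the statement is the Claim_ definition above) =====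
theorem parse_files_artifact_py_spec : Claim_equal_parse_files_artifact_py := by
  unfold Claim_equal_parse_files_artifact_py
  intro s _
  unfold Spec_parse_files_artifact_py parse_files_artifact_py parse_files_artifact_py_alt
  rw [loopAB _ _ none [] (fun _ => rfl)]
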